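-- pv_equiv track=rewrite | github.com/Kee0304/algo | 2308/230817/230816retry.py | pieces
-- ===== SOURCE A (Python) =====
-- from collections import deque
--
-- drow = [-1, 0, 1, 0]
--
-- dcol = [0, 1, 0, -1]
--
-- def pieces(points):
--     visited = set()
--     visited.add(points[0])
--     dq = deque()
--     dq.append(points[0])
--     size = 1
--     curmat = [["."]*5 for _ in range(5)]
--
--     for row,col in points:
--         curmat[row][col] = "*"
--
--     while dq:
--         curRow, curCol = dq.popleft()
--         for d in range(4):
--             nextRow = curRow + drow[d]
--             nextCol = curCol + dcol[d]
--             if 0<= nextRow <=4 and 0<= nextCol <=4: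
--                 if (nextRow,nextCol) not in visited:
--                     if curmat[nextRow][nextCol] == "*":
--                         visited.add((nextRow,nextCol))
--                         dq.append((nextRow,nextCol))
--                         size +=1
--
--     if size == len(points):
--         return True
--     else:
--         return False
-- ===== SOURCE B (Python) =====
-- def pieces(points):
--     start = points[0]
--     grid = [[False] * 5 for _ in range(5)]
--     for r, c in points:
--         grid[r][c] = True
--     comp = {start}
--     for _ in range(25):
--         comp |= {(r + dr, c + dc)
--                  for (r, c) in comp
--                  for (dr, dc) in ((-1, 0), (1, 0), (0, -1), (0, 1))
--                  if 0 <= r + dr <= 4 and 0 <= c + dc <= 4 and grid[r + dr][c + dc]}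
--     return len(comp) == len(points)
-- ===== Notes on version B (the rewrite author's own statement) =====
-- stated objective: alternative
-- what changed: Replaces A's deque BFS with an explicit visited set by marking the same 5x5 grid and iterating a dense neighbour-closure step (a set comprehension unioned into the component) to a fixpoint, then comparing the component's size with len(points).
import Mathlib
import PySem

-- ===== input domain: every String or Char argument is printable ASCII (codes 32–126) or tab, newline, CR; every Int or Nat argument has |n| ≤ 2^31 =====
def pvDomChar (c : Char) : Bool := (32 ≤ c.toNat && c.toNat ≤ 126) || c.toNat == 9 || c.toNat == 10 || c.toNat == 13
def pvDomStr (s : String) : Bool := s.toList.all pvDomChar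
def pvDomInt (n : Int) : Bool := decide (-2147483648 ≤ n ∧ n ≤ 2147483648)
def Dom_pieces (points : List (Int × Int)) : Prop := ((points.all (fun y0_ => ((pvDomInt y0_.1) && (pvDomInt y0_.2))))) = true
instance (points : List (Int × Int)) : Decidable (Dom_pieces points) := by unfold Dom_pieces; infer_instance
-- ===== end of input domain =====

-- B replaces A's deque BFS by a bounded fixpoint iteration of a dense neighbour-closure step over the
-- marked grid; equivalence is proved on every input A returns on (return value only; A mutates nothing).

-- shared 5x5 matrix primitives (both Pythons index a 5-element list of 5-element rows)
-- Python's negative-index wraparound for a length-5 list (exact for -5 ≤ i ≤ 4; Python raises outside)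
def pvIdx (i : Int) : Nat := (if i < 0 then i + 5 else i).toNat

-- m[row][col] = v
def pvMSet {α : Type} (v : α) (m : List (List α)) (r c : Int) : List (List α) :=
  m.set (pvIdx r) (((m.getD (pvIdx r) []).set (pvIdx c) v))

-- m[row][col]
def pvMGet {α : Type} (d : α) (m : List (List α)) (r c : Int) : α :=
  (m.getD (pvIdx r) []).getD (pvIdx c) d

-- ===== PORT A =====
def pvDrow : List Int := [-1, 0, 1, 0]
def pvDcol : List Int := [0, 1, 0, -1]

def pvNbr (cur : Int × Int) (d : Nat) : Int × Int :=
  (cur.1 + pvDrow.getD d 0, cur.2 + pvDcol.getD d 0)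

-- body of A's 'for d in range(4)' loop; state = (visited, dq, size)
def pvBfsStep (curmat : List (List String)) (cur : Int × Int)
    (s : PySem.Set (Int × Int) × List (Int × Int) × Int) (d : Nat) :
    PySem.Set (Int × Int) × List (Int × Int) × Int :=
  if 0 ≤ (pvNbr cur d).1 ∧ (pvNbr cur d).1 ≤ 4 ∧ 0 ≤ (pvNbr cur d).2 ∧ (pvNbr cur d).2 ≤ 4 then
    if pvNbr cur d ∈ s.1 then s
    else if pvMGet "." curmat (pvNbr cur d).1 (pvNbr cur d).2 == "*" then
      (PySem.Set.add s.1 (pvNbr cur d), s.2.1 ++ [pvNbr cur d], s.2.2 + 1)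
    else s
  else s

-- A's 'while dq' loop; the fuel guard only makes the recursion total: 64 always suffices (proved below)
def pvBfs (curmat : List (List String)) :
    Nat → PySem.Set (Int × Int) → List (Int × Int) → Int → Int
  | 0, _, _, size => size
  | fuel + 1, visited, dq, size =>
    match dq with
    | [] => size
    | cur :: rest =>
      let s := (List.range 4).foldl (pvBfsStep curmat cur) (visited, rest, size)
      pvBfs curmat fuel s.1 s.2.1 s.2.2

def pieces (points : List (Int × Int)) : Bool :=
  match points with
  | [] => false  -- Python raises IndexError on points[0]; excluded by Pre_pieces
  | p0 :: _ =>
    let visited : PySem.Set (Int × Int) := PySem.Set.add PySem.Set.empty p0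
    let curmat0 : List (List String) := List.replicate 5 (List.replicate 5 ".")
    let curmat := points.foldl (fun m rc => pvMSet "*" m rc.1 rc.2) curmat0
    let size := pvBfs curmat 64 visited [p0] 1
    size == (points.length : Int)

-- ===== PORT B =====
def pvDirs : List (Int × Int) := [(-1, 0), (1, 0), (0, -1), (0, 1)]

-- B's comprehension filter: 0 <= r <= 4 and 0 <= c <= 4 and grid[r][c]
def pvCond (grid : List (List Bool)) (q : Int × Int) : Bool :=
  decide (0 ≤ q.1) && decide (q.1 ≤ 4) && decide (0 ≤ q.2) && decide (q.2 ≤ 4) &&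
    pvMGet false grid q.1 q.2

-- one pass of B's closure step: comp |= {marked in-range neighbours of comp}
def pvGrow (grid : List (List Bool)) (comp : PySem.Set (Int × Int)) :
    PySem.Set (Int × Int) :=
  comp.foldl (fun nxt p =>
    pvDirs.foldl (fun nxt d =>
      if pvCond grid (p.1 + d.1, p.2 + d.2) then
        PySem.Set.add nxt (p.1 + d.1, p.2 + d.2)
      else nxt) nxt) comp

def pieces_alt (points : List (Int × Int)) : Bool :=
  match points with
  | [] => false  -- points[0] raises IndexError; excluded by Pre_pieces
  | p0 :: _ =>
    let grid0 : List (List Bool) := List.replicate 5 (List.replicate 5 false)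
    let grid := points.foldl (fun m rc => pvMSet true m rc.1 rc.2) grid0
    let comp0 : PySem.Set (Int × Int) := PySem.Set.add PySem.Set.empty p0
    let comp := (List.range 25).foldl (fun c _ => pvGrow grid c) comp0
    comp.length == points.length

-- ===== PRECONDITION & SPEC =====
-- Pre_ excludes exactly the inputs on which both Pythons raise IndexError: the empty list (points[0])
-- and any coordinate outside -5..4 (list indexing); everywhere else A returns and B matches it.
def Pre_pieces (points : List (Int × Int)) : Prop :=
  points ≠ [] ∧ ∀ p ∈ points, -5 ≤ p.1 ∧ p.1 ≤ 4 ∧ -5 ≤ p.2 ∧ p.2 ≤ 4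
instance (points : List (Int × Int)) : Decidable (Pre_pieces points) := by
  unfold Pre_pieces; infer_instance

def pvWitness_pieces : (List (Int × Int)) := [(0, 0), (0, 1), (4, 4)]

def Spec_pieces (points : List (Int × Int)) (out : Bool) : Prop := out = pieces_alt points
instance (points : List (Int × Int)) (out : Bool) : Decidable (Spec_pieces points out) := by
  unfold Spec_pieces; infer_instance

-- ===== CLAIM (what is proved, stated in full; the proofs are below) =====
def Claim_equal_pieces : Prop :=
  ∀ (points : List (Int × Int)), Dom_pieces points → Pre_pieces points →
    Spec_pieces points (pieces points)

-- ===== LEMMAS AND PROOFS =====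

-- the marked-cell adjacency relation both programs explore
def pvAdj (points : List (Int × Int)) (p q : Int × Int) : Prop :=
  q ∈ points ∧ ∃ d ∈ pvDirs, q = (p.1 + d.1, p.2 + d.2)

def pvReach (points : List (Int × Int)) (p0 q : Int × Int) : Prop :=
  Relation.ReflTransGen (pvAdj points) p0 q

-- ---- generic facts ----

def pvInGrid (p : Int × Int) : Prop := 0 ≤ p.1 ∧ p.1 ≤ 4 ∧ 0 ≤ p.2 ∧ p.2 ≤ 4

-- the coordinates Python's length-5 list indexing accepts
def pvInRange (p : Int × Int) : Prop := -5 ≤ p.1 ∧ p.1 ≤ 4 ∧ -5 ≤ p.2 ∧ p.2 ≤ 4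

-- the grid cell a (possibly negative) coordinate pair denotes
def pvWrap (p : Int × Int) : Int × Int := ((pvIdx p.1 : Int), (pvIdx p.2 : Int))

lemma pvAdj_iff_nbr (points : List (Int × Int)) (cur q : Int × Int) :
    pvAdj points cur q ↔ ∃ d < 4, q = pvNbr cur d ∧ q ∈ points := by
  constructor
  · rintro ⟨hq, d, hd, rfl⟩
    simp only [pvDirs, List.mem_cons, List.not_mem_nil, or_false] at hd
    rcases hd with rfl | rfl | rfl | rfl
    · exact ⟨0, by omega, by simp [pvNbr, pvDrow, pvDcol], hq⟩
    · exact ⟨2, by omega, by simp [pvNbr, pvDrow, pvDcol], hq⟩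
    · exact ⟨3, by omega, by simp [pvNbr, pvDrow, pvDcol], hq⟩
    · exact ⟨1, by omega, by simp [pvNbr, pvDrow, pvDcol], hq⟩
  · rintro ⟨d, hd, rfl, hq⟩
    refine ⟨hq, ?_⟩
    interval_cases d
    · exact ⟨(-1, 0), by simp [pvDirs], by simp [pvNbr, pvDrow, pvDcol]⟩
    · exact ⟨(0, 1), by simp [pvDirs], by simp [pvNbr, pvDrow, pvDcol]⟩
    · exact ⟨(1, 0), by simp [pvDirs], by simp [pvNbr, pvDrow, pvDcol]⟩
    · exact ⟨(0, -1), by simp [pvDirs], by simp [pvNbr, pvDrow, pvDcol]⟩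

lemma pv_comp_char (points : List (Int × Int)) (p0 : Int × Int) (S : List (Int × Int))
    (h0 : p0 ∈ S) (hc : ∀ p ∈ S, ∀ q, pvAdj points p q → q ∈ S)
    (hs : ∀ x ∈ S, pvReach points p0 x) : ∀ x, x ∈ S ↔ pvReach points p0 x := by
  intro x
  refine ⟨hs x, fun h => ?_⟩
  induction h with
  | refl => exact h0
  | tail _ hadj ih => exact hc _ ih _ hadj

lemma pvAdj_def (points : List (Int × Int)) (p q : Int × Int) :
    pvAdj points p q ↔ q ∈ points ∧ ∃ d ∈ pvDirs, q = (p.1 + d.1, p.2 + d.2) := Iff.rfl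

def pvGridList : List (Int × Int) :=
  (List.range 5).flatMap (fun r => (List.range 5).map (fun c => (Int.ofNat r, Int.ofNat c)))

lemma pv_mem_gridList (x : Int × Int) (hx : pvInGrid x) : x ∈ pvGridList := by
  obtain ⟨a, b⟩ := x
  obtain ⟨h1, h2, h3, h4⟩ := hx
  have e1 : (Int.ofNat a.toNat, Int.ofNat b.toNat) = (a, b) := by
    simp only [Prod.mk.injEq]
    exact ⟨Int.toNat_of_nonneg h1, Int.toNat_of_nonneg h3⟩
  unfold pvGridList
  rw [List.mem_flatMap]
  exact ⟨a.toNat, List.mem_range.mpr (show a.toNat < 5 by omega),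
    List.mem_map.mpr ⟨b.toNat, List.mem_range.mpr (show b.toNat < 5 by omega), e1⟩⟩

lemma pv_gridFinset_card : pvGridList.toFinset.card ≤ 25 := by
  have h := List.toFinset_card_le pvGridList
  rw [show pvGridList.length = 25 from rfl] at h
  exact h

-- at most 26 distinct cells: the (possibly off-grid) start plus the 25 grid cells
lemma pv_card_le_26 (p0 : Int × Int) (V : List (Int × Int)) (hnd : V.Nodup)
    (hg : ∀ x ∈ V, x = p0 ∨ pvInGrid x) : V.length ≤ 26 := by
  have hsub : V.toFinset ⊆ insert p0 pvGridList.toFinset := by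
    intro x hx
    rcases hg x (List.mem_toFinset.mp hx) with rfl | h
    · exact Finset.mem_insert_self _ _
    · exact Finset.mem_insert_of_mem (List.mem_toFinset.mpr (pv_mem_gridList x h))
  have h1 : V.toFinset.card = V.length := List.toFinset_card_of_nodup hnd
  have h2 := Finset.card_insert_le p0 pvGridList.toFinset
  have h3 := pv_gridFinset_card
  have h4 := Finset.card_le_card hsub
  omega

-- ---- the marked matrix (generic in the cell type: A fills Strings, B fills Bools) ----

def pvShape {α : Type} (m : List (List α)) : Prop := m.length = 5 ∧ ∀ r ∈ m, r.length = 5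

lemma pvIdx_eq (i : Int) (h0 : 0 ≤ i) : pvIdx i = i.toNat := by
  unfold pvIdx; rw [if_neg (by omega)]

lemma pvIdx_lt5 (i : Int) (h : -5 ≤ i ∧ i ≤ 4) : pvIdx i < 5 := by
  unfold pvIdx; split <;> omega

lemma pvWrap_inGrid (p : Int × Int) (h : pvInRange p) : pvInGrid (pvWrap p) := by
  have h1 := pvIdx_lt5 p.1 ⟨h.1, h.2.1⟩
  have h2 := pvIdx_lt5 p.2 ⟨h.2.2.1, h.2.2.2⟩
  unfold pvInGrid pvWrap
  refine ⟨by simp, ?_, by simp, ?_⟩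
  · show ((pvIdx p.1 : Int)) ≤ 4
    exact_mod_cast Nat.le_of_lt_succ h1
  · show ((pvIdx p.2 : Int)) ≤ 4
    exact_mod_cast Nat.le_of_lt_succ h2

lemma pv_matSet_shape {α : Type} (v : α) (m : List (List α)) (r c : Int) (hm : pvShape m)
    (hr : -5 ≤ r ∧ r ≤ 4) : pvShape (pvMSet v m r c) := by
  obtain ⟨h5, hrows⟩ := hm
  have hrlt : pvIdx r < m.length := by have := pvIdx_lt5 r hr; omega
  refine ⟨by simp [pvMSet, h5], ?_⟩
  intro row hrow
  unfold pvMSet at hrow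
  rcases List.mem_or_eq_of_mem_set hrow with h | rfl
  · exact hrows _ h
  · rw [List.length_set, List.getD_eq_getElem m [] hrlt]
    exact hrows _ (List.getElem_mem hrlt)

lemma pv_matGet_matSet {α : Type} (v d0 : α) (m : List (List α)) (r c r' c' : Int)
    (hm : pvShape m)
    (hr : 0 ≤ r ∧ r ≤ 4) (hc : 0 ≤ c ∧ c ≤ 4) (hr' : -5 ≤ r' ∧ r' ≤ 4) (hc' : -5 ≤ c' ∧ c' ≤ 4) :
    pvMGet d0 (pvMSet v m r' c') r c =
      if pvWrap (r', c') = (r, c) then v else pvMGet d0 m r c := by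
  obtain ⟨h5, hrows⟩ := hm
  have hR' : pvIdx r' < 5 := pvIdx_lt5 r' hr'
  have hC' : pvIdx c' < 5 := pvIdx_lt5 c' hc'
  have hrlt : r.toNat < m.length := by omega
  have hrlt' : pvIdx r' < m.length := by omega
  have hrow' : m.getD (pvIdx r') [] = m[pvIdx r'] := List.getD_eq_getElem m [] hrlt'
  have hlen' : m[pvIdx r'].length = 5 := hrows _ (List.getElem_mem hrlt')
  have hwrap : (pvWrap (r', c') = (r, c)) ↔ (pvIdx r' = r.toNat ∧ pvIdx c' = c.toNat) := by
    unfold pvWrap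
    simp only [Prod.mk.injEq]
    omega
  unfold pvMGet pvMSet
  rw [pvIdx_eq r hr.1, pvIdx_eq c hc.1]
  rw [hrow']
  by_cases hrr : pvIdx r' = r.toNat
  · have e1 : (m.set (pvIdx r') (m[pvIdx r'].set (pvIdx c') v)).getD r.toNat []
        = m[pvIdx r'].set (pvIdx c') v := by
      rw [List.getD_eq_getElem?_getD, ← hrr, List.getElem?_set_self hrlt']; rfl
    rw [e1]
    by_cases hcc : pvIdx c' = c.toNat
    · have e2 : (m[pvIdx r'].set (pvIdx c') v).getD c.toNat d0 = v := by
        rw [List.getD_eq_getElem?_getD, ← hcc, List.getElem?_set_self (by omega)]; rfl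
      rw [e2, if_pos (hwrap.mpr ⟨hrr, hcc⟩)]
    · have e2 : (m[pvIdx r'].set (pvIdx c') v).getD c.toNat d0
          = m[pvIdx r'].getD c.toNat d0 := by
        rw [List.getD_eq_getElem?_getD, List.getElem?_set_ne (by omega), ← List.getD_eq_getElem?_getD]
      rw [e2, if_neg (fun h => hcc (hwrap.mp h).2), ← hrr, hrow']
  · have e1 : (m.set (pvIdx r') (m[pvIdx r'].set (pvIdx c') v)).getD r.toNat []
        = m.getD r.toNat [] := by
      rw [List.getD_eq_getElem?_getD, List.getElem?_set_ne (by omega), ← List.getD_eq_getElem?_getD]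
    rw [e1, if_neg (fun h => hrr (hwrap.mp h).1)]

lemma pv_matGet0 {α : Type} (d0 : α) (r c : Int) (hr : 0 ≤ r ∧ r ≤ 4) (hc : 0 ≤ c ∧ c ≤ 4) :
    pvMGet d0 (List.replicate 5 (List.replicate 5 d0)) r c = d0 := by
  unfold pvMGet
  rw [pvIdx_eq r hr.1, pvIdx_eq c hc.1]
  have h1 : r.toNat < (List.replicate 5 (List.replicate (5 : Nat) d0)).length := by
    rw [List.length_replicate]; omega
  rw [List.getD_eq_getElem _ _ h1, List.getElem_replicate]
  have h2 : c.toNat < (List.replicate (5 : Nat) d0).length := by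
    rw [List.length_replicate]; omega
  rw [List.getD_eq_getElem _ _ h2, List.getElem_replicate]

lemma pv_shape0 {α : Type} (d0 : α) : pvShape (List.replicate 5 (List.replicate 5 d0)) := by
  constructor
  · simp
  · intro r hr
    rw [List.eq_of_mem_replicate hr]; simp

lemma pv_mat_fold {α : Type} [DecidableEq α] (v : α) (d0 : α) (pts : List (Int × Int)) :
    ∀ (m : List (List α)), pvShape m → (∀ p ∈ pts, pvInRange p) →
    pvShape (pts.foldl (fun m rc => pvMSet v m rc.1 rc.2) m) ∧
    ∀ q : Int × Int, pvInGrid q →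
      (pvMGet d0 (pts.foldl (fun m rc => pvMSet v m rc.1 rc.2) m) q.1 q.2 = v ↔
        q ∈ pts.map pvWrap ∨ pvMGet d0 m q.1 q.2 = v) := by
  induction pts with
  | nil => intro m hm _; exact ⟨hm, fun q _ => by simp⟩
  | cons a pts ih =>
    intro m hm hg
    have ha := hg a (by simp)
    have hm' : pvShape (pvMSet v m a.1 a.2) := pv_matSet_shape v m a.1 a.2 hm ⟨ha.1, ha.2.1⟩
    obtain ⟨hsh, hmem⟩ := ih (pvMSet v m a.1 a.2) hm' (fun p hp => hg p (by simp [hp]))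
    refine ⟨by simpa using hsh, fun q hq => ?_⟩
    have := hmem q hq
    simp only [List.foldl_cons] at *
    rw [this, pv_matGet_matSet v d0 m q.1 q.2 a.1 a.2 hm ⟨hq.1, hq.2.1⟩ ⟨hq.2.2.1, hq.2.2.2⟩
      ⟨ha.1, ha.2.1⟩ ⟨ha.2.2.1, ha.2.2.2⟩]
    by_cases hqa : pvWrap (a.1, a.2) = (q.1, q.2)
    · have hqa' : pvWrap a = q := hqa
      rw [if_pos hqa]
      simp [← hqa']
    · have hqa' : q ≠ pvWrap a := fun he => hqa he.symm
      rw [if_neg hqa]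
      simp only [List.map_cons, List.mem_cons]
      constructor
      · intro h; tauto
      · rintro (h | h)
        · rcases h with h | h
          · exact absurd h hqa'
          · tauto
        · tauto

-- ---- A-side: the BFS loop ----

lemma pv_step_cases (points : List (Int × Int)) (mat : List (List String))
    (hmat : ∀ q : Int × Int, pvInGrid q → (pvMGet "." mat q.1 q.2 = "*" ↔ q ∈ points))
    (hgrid : ∀ p ∈ points, pvInGrid p)
    (cur : Int × Int) (s : PySem.Set (Int × Int) × List (Int × Int) × Int) (d : Nat) :
    (pvNbr cur d ∈ points → pvNbr cur d ∈ (pvBfsStep mat cur s d).1) ∧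
    (pvBfsStep mat cur s d = s ∨
      (pvNbr cur d ∉ s.1 ∧ pvNbr cur d ∈ points ∧
        pvBfsStep mat cur s d =
          (s.1 ++ [pvNbr cur d], s.2.1 ++ [pvNbr cur d], s.2.2 + 1))) := by
  by_cases h1 : 0 ≤ (pvNbr cur d).1 ∧ (pvNbr cur d).1 ≤ 4 ∧ 0 ≤ (pvNbr cur d).2 ∧ (pvNbr cur d).2 ≤ 4
  · by_cases h2 : pvNbr cur d ∈ s.1
    · have he : pvBfsStep mat cur s d = s := by
        unfold pvBfsStep; rw [if_pos h1, if_pos h2]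
      rw [he]; exact ⟨fun _ => h2, Or.inl rfl⟩
    · by_cases h3 : pvNbr cur d ∈ points
      · have hb : (pvMGet "." mat (pvNbr cur d).1 (pvNbr cur d).2 == "*") = true := by
          simp [(hmat _ h1).mpr h3]
        have he : pvBfsStep mat cur s d =
            (s.1 ++ [pvNbr cur d], s.2.1 ++ [pvNbr cur d], s.2.2 + 1) := by
          unfold pvBfsStep
          rw [if_pos h1, if_neg h2, if_pos hb, PySem.Set.add_of_not_mem h2]
        rw [he]
        exact ⟨fun _ => by simp, Or.inr ⟨h2, h3, rfl⟩⟩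
      · have hb : ¬ ((pvMGet "." mat (pvNbr cur d).1 (pvNbr cur d).2 == "*") = true) := by
          simp only [beq_iff_eq]
          exact fun he => h3 ((hmat _ h1).mp he)
        have he : pvBfsStep mat cur s d = s := by
          unfold pvBfsStep; rw [if_pos h1, if_neg h2, if_neg hb]
        rw [he]; exact ⟨fun hp => absurd hp h3, Or.inl rfl⟩
  · have h3 : pvNbr cur d ∉ points := fun hq => h1 (hgrid _ hq)
    have he : pvBfsStep mat cur s d = s := by unfold pvBfsStep; rw [if_neg h1]
    rw [he]; exact ⟨fun hp => absurd hp h3, Or.inl rfl⟩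

lemma pv_fold_spec (points : List (Int × Int)) (mat : List (List String))
    (hmat : ∀ q : Int × Int, pvInGrid q → (pvMGet "." mat q.1 q.2 = "*" ↔ q ∈ points))
    (hgrid : ∀ p ∈ points, pvInGrid p) (cur : Int × Int) :
    ∀ (ds : List Nat) (s : PySem.Set (Int × Int) × List (Int × Int) × Int), s.1.Nodup →
    ∃ t : List (Int × Int),
      ds.foldl (pvBfsStep mat cur) s = (s.1 ++ t, s.2.1 ++ t, s.2.2 + t.length) ∧
      (s.1 ++ t).Nodup ∧
      (∀ q ∈ t, q ∈ points ∧ ∃ d' ∈ ds, q = pvNbr cur d') ∧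
      (∀ d ∈ ds, pvNbr cur d ∈ points → pvNbr cur d ∈ s.1 ++ t) := by
  intro ds
  induction ds with
  | nil =>
    intro s hnd
    exact ⟨[], by simp, by simpa using hnd, by simp, by simp⟩
  | cons d ds ih =>
    intro s hnd
    obtain ⟨hmem, hcase⟩ := pv_step_cases points mat hmat hgrid cur s d
    rcases hcase with heq | ⟨hnin, hin, heq⟩
    · obtain ⟨t, h1, h2, h3, h4⟩ := ih s hnd
      rw [List.foldl_cons, heq]
      refine ⟨t, h1, h2, fun q hq => ⟨(h3 q hq).1, ?_⟩, fun d' hd' hp => ?_⟩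
      · obtain ⟨d', hd', he⟩ := (h3 q hq).2
        exact ⟨d', List.mem_cons_of_mem _ hd', he⟩
      · rcases List.mem_cons.mp hd' with rfl | hd'
        · have h5 := hmem hp; rw [heq] at h5
          exact List.mem_append_left _ h5
        · exact h4 d' hd' hp
    · have hnd' : (s.1 ++ [pvNbr cur d]).Nodup := by
        rw [← List.concat_eq_append]; exact hnd.concat hnin
      obtain ⟨t, h1, h2, h3, h4⟩ :=
        ih (s.1 ++ [pvNbr cur d], s.2.1 ++ [pvNbr cur d], s.2.2 + 1) hnd'
      refine ⟨pvNbr cur d :: t, ?_, ?_, ?_, ?_⟩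
      · rw [List.foldl_cons, heq, h1]
        show ((s.1 ++ [pvNbr cur d]) ++ t, (s.2.1 ++ [pvNbr cur d]) ++ t,
            (s.2.2 + 1) + (t.length : Int)) =
          (s.1 ++ pvNbr cur d :: t, s.2.1 ++ pvNbr cur d :: t,
            s.2.2 + ((pvNbr cur d :: t).length : Int))
        refine congrArg₂ Prod.mk ?_ (congrArg₂ Prod.mk ?_ ?_)
        · rw [List.append_assoc, List.singleton_append]
        · rw [List.append_assoc, List.singleton_append]
        · rw [List.length_cons]; push_cast; ring
      · rw [List.append_assoc] at h2
        exact h2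
      · rintro q hq
        rcases List.mem_cons.mp hq with rfl | hq
        · exact ⟨hin, d, List.mem_cons_self .., rfl⟩
        · obtain ⟨hq1, d', hd', he'⟩ := h3 q hq
          exact ⟨hq1, d', List.mem_cons_of_mem _ hd', he'⟩
      · intro d'' hd'' hp
        rcases List.mem_cons.mp hd'' with rfl | hd''
        · exact List.mem_append_right _ (List.mem_cons_self ..)
        · have h5 := h4 d'' hd'' hp
          rw [List.append_assoc] at h5
          exact h5

lemma pv_bfs_run (points : List (Int × Int)) (p0 : Int × Int) (mat : List (List String))
    (hmat : ∀ q : Int × Int, pvInGrid q → (pvMGet "." mat q.1 q.2 = "*" ↔ q ∈ points))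
    (hgrid : ∀ p ∈ points, pvInGrid p) :
    ∀ (fuel : Nat) (V : PySem.Set (Int × Int)) (dq : List (Int × Int)) (sz : Int),
    V.Nodup → sz = (V.length : Int) → (∀ x ∈ dq, x ∈ V) → p0 ∈ V →
    (∀ x ∈ V, pvReach points p0 x) → (∀ x ∈ V, x = p0 ∨ pvInGrid x) →
    (∀ x ∈ V, x ∉ dq → ∀ q, pvAdj points x q → q ∈ V) →
    dq.length + (26 - V.length) < fuel →
    ∃ W : List (Int × Int), pvBfs mat fuel V dq sz = (W.length : Int) ∧ W.Nodup ∧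
      (∀ x, x ∈ W ↔ pvReach points p0 x) := by
  intro fuel
  induction fuel with
  | zero => intro V dq sz _ _ _ _ _ _ _ hf; omega
  | succ fuel ih =>
    intro V dq sz hnd hsz hdqV hp0 hreach hingrid hclosed hf
    match dq with
    | [] =>
      refine ⟨V, by simp [pvBfs, hsz], hnd, ?_⟩
      exact pv_comp_char points p0 V hp0 (fun p hp q hq => hclosed p hp (by simp) q hq) hreach
    | cur :: rest =>
      have hcurV : cur ∈ V := hdqV cur (by simp)
      obtain ⟨t, h1, h2, h3, h4⟩ :=
        pv_fold_spec points mat hmat hgrid cur (List.range 4) (V, rest, sz) hnd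
      have hV26 : V.length ≤ 26 := pv_card_le_26 p0 V hnd hingrid
      have hVt : (V ++ t).length ≤ 26 := by
        refine pv_card_le_26 p0 _ h2 ?_
        intro x hx
        rcases List.mem_append.mp hx with hx | hx
        · exact hingrid x hx
        · exact Or.inr (hgrid x (h3 x hx).1)
      have hVt' : V.length + t.length ≤ 26 := by
        rw [List.length_append] at hVt; exact hVt
      have hstep : pvBfs mat (fuel + 1) V (cur :: rest) sz =
          pvBfs mat fuel (V ++ t) (rest ++ t) (sz + t.length) := by
        simp only [pvBfs]
        rw [h1]
      rw [hstep]
      refine ih (V ++ t) (rest ++ t) (sz + t.length) h2 ?_ ?_ ?_ ?_ ?_ ?_ ?_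
      · rw [List.length_append, hsz]; push_cast; ring
      · intro x hx
        rcases List.mem_append.mp hx with hx | hx
        · exact List.mem_append_left _ (hdqV x (by simp [hx]))
        · exact List.mem_append_right _ hx
      · exact List.mem_append_left _ hp0
      · intro x hx
        rcases List.mem_append.mp hx with hx | hx
        · exact hreach x hx
        · obtain ⟨hxp, d', hd', rfl⟩ := h3 x hx
          have hadj : pvAdj points cur (pvNbr cur d') :=
            (pvAdj_iff_nbr points cur _).mpr ⟨d', List.mem_range.mp hd', rfl, hxp⟩
          exact Relation.ReflTransGen.tail (hreach cur hcurV) hadj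
      · intro x hx
        rcases List.mem_append.mp hx with hx | hx
        · exact hingrid x hx
        · exact Or.inr (hgrid x (h3 x hx).1)
      · intro x hx hxndq q hq
        rcases List.mem_append.mp hx with hxV | hxt
        · by_cases hxc : x = cur
          · subst hxc
            obtain ⟨d, hd4, rfl, hqp⟩ := (pvAdj_iff_nbr points x q).mp hq
            exact h4 d (List.mem_range.mpr hd4) hqp
          · have hxr : x ∉ rest := fun hc => hxndq (List.mem_append_left _ hc)
            have h5 := hclosed x hxV (by simp [hxc, hxr]) q hq
            exact List.mem_append_left _ h5
        · exact absurd (List.mem_append_right rest hxt) hxndq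
      · have hf' : rest.length + 1 + (26 - V.length) < fuel + 1 := by
          simpa using hf
        simp only [List.length_append]
        omega

-- ---- B-side: the closure iteration ----

lemma pv_mem_addif_fold (points : List (Int × Int)) (grid : List (List Bool))
    (hcond : ∀ y, pvCond grid y = true ↔ y ∈ points) (p : Int × Int) :
    ∀ (ds : List (Int × Int)) (acc : PySem.Set (Int × Int)) (y : Int × Int),
    y ∈ ds.foldl (fun nxt d =>
        if pvCond grid (p.1 + d.1, p.2 + d.2) then
          PySem.Set.add nxt (p.1 + d.1, p.2 + d.2)
        else nxt) acc ↔
      y ∈ acc ∨ ∃ d ∈ ds, y = (p.1 + d.1, p.2 + d.2) ∧ y ∈ points := by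
  intro ds
  induction ds with
  | nil => intro acc y; simp
  | cons d ds ih =>
    intro acc y
    rw [List.foldl_cons]
    by_cases hc : pvCond grid (p.1 + d.1, p.2 + d.2) = true
    · rw [if_pos hc, ih]
      have hp : (p.1 + d.1, p.2 + d.2) ∈ points := (hcond _).mp hc
      simp only [PySem.Set.mem_add, List.mem_cons]
      constructor
      · rintro ((hy | rfl) | ⟨d', hd', he⟩)
        · exact Or.inl hy
        · exact Or.inr ⟨d, Or.inl rfl, rfl, hp⟩
        · exact Or.inr ⟨d', Or.inr hd', he⟩
      · rintro (hy | ⟨d', (rfl | hd'), he⟩)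
        · exact Or.inl (Or.inl hy)
        · exact Or.inl (Or.inr he.1)
        · exact Or.inr ⟨d', hd', he⟩
    · rw [if_neg hc, ih]
      have hp : (p.1 + d.1, p.2 + d.2) ∉ points := fun h => hc ((hcond _).mpr h)
      simp only [List.mem_cons]
      constructor
      · rintro (hy | ⟨d', hd', he⟩)
        · exact Or.inl hy
        · exact Or.inr ⟨d', Or.inr hd', he⟩
      · rintro (hy | ⟨d', (rfl | hd'), he, hyp⟩)
        · exact Or.inl hy
        · exact absurd (he ▸ hyp) hp
        · exact Or.inr ⟨d', hd', he, hyp⟩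

lemma pv_mem_grow (points : List (Int × Int)) (grid : List (List Bool))
    (hcond : ∀ y, pvCond grid y = true ↔ y ∈ points)
    (c : PySem.Set (Int × Int)) (y : Int × Int) :
    y ∈ pvGrow grid c ↔ y ∈ c ∨ ∃ p ∈ c, pvAdj points p y := by
  unfold pvGrow
  have haux : ∀ (L : List (Int × Int)) (acc : PySem.Set (Int × Int)),
      y ∈ L.foldl (fun nxt p => pvDirs.foldl (fun nxt d =>
        if pvCond grid (p.1 + d.1, p.2 + d.2) then
          PySem.Set.add nxt (p.1 + d.1, p.2 + d.2)
        else nxt) nxt) acc ↔ y ∈ acc ∨ ∃ p ∈ L, pvAdj points p y := by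
    intro L
    induction L with
    | nil => intro acc; simp
    | cons p L ih =>
      intro acc
      rw [List.foldl_cons, ih, pv_mem_addif_fold points grid hcond p]
      simp only [pvAdj_def, List.mem_cons]
      constructor
      · rintro ((hy | ⟨d, hd, he, hyp⟩) | ⟨p', hp', hyp, d, hd, he⟩)
        · exact Or.inl hy
        · exact Or.inr ⟨p, Or.inl rfl, hyp, d, hd, he⟩
        · exact Or.inr ⟨p', Or.inr hp', hyp, d, hd, he⟩
      · rintro (hy | ⟨p', (rfl | hp'), hyp, d, hd, he⟩)
        · exact Or.inl (Or.inl hy)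
        · exact Or.inl (Or.inr ⟨d, hd, he, hyp⟩)
        · exact Or.inr ⟨p', hp', hyp, d, hd, he⟩
  exact haux c c

lemma pv_grow_nodup (grid : List (List Bool)) (c : PySem.Set (Int × Int)) (hnd : c.Nodup) :
    (pvGrow grid c).Nodup := by
  unfold pvGrow
  have haux : ∀ (L : List (Int × Int)) (acc : PySem.Set (Int × Int)), acc.Nodup →
      (L.foldl (fun nxt p => pvDirs.foldl (fun nxt d =>
        if pvCond grid (p.1 + d.1, p.2 + d.2) then
          PySem.Set.add nxt (p.1 + d.1, p.2 + d.2)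
        else nxt) nxt) acc).Nodup := by
    intro L
    induction L with
    | nil => intro acc h; simpa using h
    | cons p L ih =>
      intro acc hacc
      rw [List.foldl_cons]
      refine ih _ ?_
      have hinner : ∀ (ds : List (Int × Int)) (a : PySem.Set (Int × Int)), a.Nodup →
          (ds.foldl (fun nxt d =>
            if pvCond grid (p.1 + d.1, p.2 + d.2) then
              PySem.Set.add nxt (p.1 + d.1, p.2 + d.2)
            else nxt) a).Nodup := by
        intro ds
        induction ds with
        | nil => intro a h; simpa using h
        | cons d ds ihd =>
          intro a ha
          rw [List.foldl_cons]
          refine ihd _ ?_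
          split
          · exact PySem.Set.nodup_add _ _ ha
          · exact ha
      exact hinner pvDirs acc hacc
  exact haux c c hnd

lemma pv_grow_prefix (grid : List (List Bool)) (c : PySem.Set (Int × Int)) :
    c <+: pvGrow grid c := by
  unfold pvGrow
  have haux : ∀ (L : List (Int × Int)) (acc : PySem.Set (Int × Int)),
      acc <+: L.foldl (fun nxt p => pvDirs.foldl (fun nxt d =>
        if pvCond grid (p.1 + d.1, p.2 + d.2) then
          PySem.Set.add nxt (p.1 + d.1, p.2 + d.2)
        else nxt) nxt) acc := by
    intro L
    induction L with
    | nil => intro acc; simp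
    | cons p L ih =>
      intro acc
      rw [List.foldl_cons]
      refine List.IsPrefix.trans ?_ (ih _)
      have hinner : ∀ (ds : List (Int × Int)) (a : PySem.Set (Int × Int)),
          a <+: ds.foldl (fun nxt d =>
            if pvCond grid (p.1 + d.1, p.2 + d.2) then
              PySem.Set.add nxt (p.1 + d.1, p.2 + d.2)
            else nxt) a := by
        intro ds
        induction ds with
        | nil => intro a; simp
        | cons d ds ihd =>
          intro a
          rw [List.foldl_cons]
          refine List.IsPrefix.trans ?_ (ihd _)
          split
          · rw [PySem.Set.add_eq_ite]
            split
            · exact List.prefix_rfl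
            · exact List.prefix_append a _
          · exact List.prefix_rfl
      exact hinner pvDirs acc
  exact haux c c

lemma pv_foldl_range_const {α : Type} (g : α → α) :
    ∀ (n : Nat) (x : α), (List.range n).foldl (fun c _ => g c) x = g^[n] x := by
  intro n
  induction n with
  | zero => intro x; simp
  | succ n ih =>
    intro x
    rw [List.range_succ, List.foldl_append, ih, Function.iterate_succ_apply']
    simp

-- ===== final assembly =====

lemma pv_pieces_eq (points : List (Int × Int)) (hpre : Pre_pieces points) :
    pieces points = pieces_alt points := by
  obtain ⟨hne, hrange'⟩ := hpre
  obtain ⟨p0, tl, rfl⟩ : ∃ p0 tl, points = p0 :: tl := by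
    cases points with
    | nil => exact absurd rfl hne
    | cons a l => exact ⟨a, l, rfl⟩
  have hrange : ∀ p ∈ p0 :: tl, pvInRange p := fun p hp => hrange' p hp
  have hp0 : p0 ∈ p0 :: tl := by simp
  -- the set of grid cells both programs mark (coordinates resolved through Python's indexing)
  set mark : List (Int × Int) := (p0 :: tl).map pvWrap with hmkdef
  have hgridM : ∀ q ∈ mark, pvInGrid q := by
    intro q hq
    obtain ⟨p, hp, rfl⟩ := List.mem_map.mp hq
    exact pvWrap_inGrid p (hrange p hp)
  -- A's marked matrix reads back exactly the marked cells
  obtain ⟨_, hmatA'⟩ :=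
    pv_mat_fold "*" "." (p0 :: tl) (List.replicate 5 (List.replicate 5 ".")) (pv_shape0 ".")
      hrange
  have hmat : ∀ q : Int × Int, pvInGrid q →
      (pvMGet "." ((p0 :: tl).foldl (fun m rc => pvMSet "*" m rc.1 rc.2)
        (List.replicate 5 (List.replicate 5 "."))) q.1 q.2 = "*" ↔ q ∈ mark) := by
    intro q hq
    rw [hmatA' q hq, pv_matGet0 "." q.1 q.2 ⟨hq.1, hq.2.1⟩ ⟨hq.2.2.1, hq.2.2.2⟩, hmkdef]
    simp
  -- B's boolean grid reads back exactly the marked cells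
  obtain ⟨_, hmatB'⟩ :=
    pv_mat_fold true false (p0 :: tl) (List.replicate 5 (List.replicate 5 false))
      (pv_shape0 false) hrange
  set grid := (p0 :: tl).foldl (fun m rc => pvMSet true m rc.1 rc.2)
    (List.replicate 5 (List.replicate 5 false)) with hgdef
  have hcond : ∀ y, pvCond grid y = true ↔ y ∈ mark := by
    intro y
    have h1 : pvCond grid y = true ↔
        (0 ≤ y.1 ∧ y.1 ≤ 4 ∧ 0 ≤ y.2 ∧ y.2 ≤ 4) ∧ pvMGet false grid y.1 y.2 = true := by
      simp [pvCond, Bool.and_eq_true, and_assoc]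
    rw [h1]
    constructor
    · rintro ⟨hg, hv⟩
      have h2 := hmatB' y hg
      rw [hgdef] at hv
      rw [h2, pv_matGet0 false y.1 y.2 ⟨hg.1, hg.2.1⟩ ⟨hg.2.2.1, hg.2.2.2⟩] at hv
      rw [hmkdef]
      simpa using hv
    · intro hy
      have hg := hgridM y hy
      refine ⟨hg, ?_⟩
      rw [hgdef, hmatB' y hg]
      rw [hmkdef] at hy
      exact Or.inl hy
  have hV0 : PySem.Set.add (PySem.Set.empty) p0 = [p0] := by
    have h : p0 ∉ (PySem.Set.empty : PySem.Set (Int × Int)) := by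
      simp [PySem.Set.empty]
    rw [PySem.Set.add_of_not_mem h]; rfl
  -- A-side: the BFS visits exactly the cells reachable from the start through marked cells
  obtain ⟨W, hW, hWnd, hWmem⟩ :=
    pv_bfs_run mark p0 _ hmat hgridM 64 [p0] [p0] 1
      (List.nodup_singleton p0) (by simp) (fun x hx => hx) (by simp)
      (fun x hx => by rw [List.mem_singleton] at hx; subst hx; exact Relation.ReflTransGen.refl)
      (fun x hx => Or.inl (List.mem_singleton.mp hx))
      (fun x hx hx2 => absurd hx hx2)
      (by norm_num)
  -- B-side: the iterated closure reaches exactly those cells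
  set C : Nat → PySem.Set (Int × Int) := fun k => (pvGrow grid)^[k] [p0] with hC
  have hC0 : C 0 = [p0] := rfl
  have hCsucc : ∀ k, C (k + 1) = pvGrow grid (C k) := by
    intro k
    show (pvGrow grid)^[k + 1] [p0] = pvGrow grid ((pvGrow grid)^[k] [p0])
    exact Function.iterate_succ_apply' _ _ _
  have hCinv : ∀ k, (C k).Nodup ∧ p0 ∈ C k ∧ (∀ x ∈ C k, x = p0 ∨ x ∈ mark) ∧
      (∀ x ∈ C k, pvReach mark p0 x) := by
    intro k
    induction k with
    | zero =>
      rw [hC0]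
      refine ⟨List.nodup_singleton p0, by simp, ?_, ?_⟩
      · intro x hx; rw [List.mem_singleton] at hx; subst hx; exact Or.inl rfl
      · intro x hx; rw [List.mem_singleton] at hx; subst hx; exact Relation.ReflTransGen.refl
    | succ k ihk =>
      obtain ⟨ih1, ih2, ih3, ih4⟩ := ihk
      rw [hCsucc]
      refine ⟨pv_grow_nodup grid _ ih1, ?_, ?_, ?_⟩
      · exact (pv_grow_prefix grid (C k)).subset ih2
      · intro x hx
        rcases (pv_mem_grow mark grid hcond _ x).mp hx with hx | ⟨p, _, hadj⟩
        · exact ih3 x hx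
        · exact Or.inr ((pvAdj_def mark p x).mp hadj).1
      · intro x hx
        rcases (pv_mem_grow mark grid hcond _ x).mp hx with hx | ⟨p, hpc, hadj⟩
        · exact ih4 x hx
        · exact Relation.ReflTransGen.tail (ih4 p hpc) hadj
  set n := (p0 :: tl).length with hn
  obtain ⟨hCnd, hCp0, hCsub, hCreach⟩ := hCinv 25
  -- C 25 is closed under adjacency: either some step below 25 is a fixpoint, or C 25 already
  -- holds all 26 possible cells (the start plus the whole grid)
  have hclosedC : ∀ p ∈ C 25, ∀ q, pvAdj mark p q → q ∈ C 25 := by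
    by_cases hfix : ∃ k, k < 25 ∧ pvGrow grid (C k) = C k
    · obtain ⟨k, hk, hfixk⟩ := hfix
      have hCn : C 25 = C k := by
        have h1 : C 25 = (pvGrow grid)^[25 - k] (C k) := by
          show (pvGrow grid)^[25] [p0] = (pvGrow grid)^[25 - k] ((pvGrow grid)^[k] [p0])
          rw [← Function.iterate_add_apply]
          congr 1
          omega
        rw [h1, Function.iterate_fixed hfixk]
      intro p hp q hq
      rw [hCn] at hp ⊢
      have h1 : q ∈ pvGrow grid (C k) :=
        (pv_mem_grow mark grid hcond _ q).mpr (Or.inr ⟨p, hp, hq⟩)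
      rwa [hfixk] at h1
    · have hfix' : ∀ k, k < 25 → pvGrow grid (C k) ≠ C k := by
        intro k hk hc
        exact hfix ⟨k, hk, hc⟩
      have hlen : ∀ k, k ≤ 25 → k + 1 ≤ (C k).length := by
        intro k
        induction k with
        | zero => intro _; rw [hC0]; simp
        | succ k ihk =>
          intro hk
          have h1 := ihk (by omega)
          have h2 := hfix' k (by omega)
          obtain ⟨t, ht⟩ := pv_grow_prefix grid (C k)
          have htne : t ≠ [] := by
            rintro rfl
            rw [List.append_nil] at ht
            exact h2 ht.symm
          have h3 : 1 ≤ t.length := List.length_pos_iff.mpr htne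
          rw [hCsucc, ← ht, List.length_append]
          omega
      have h26 : 26 ≤ (C 25).length := hlen 25 le_rfl
      have hball : ∀ x ∈ C 25, x = p0 ∨ pvInGrid x :=
        fun x hx => (hCsub x hx).imp id (fun h => hgridM x h)
      have hle : (C 25).length ≤ 26 := pv_card_le_26 p0 (C 25) hCnd hball
      have hsubF : (C 25).toFinset ⊆ insert p0 pvGridList.toFinset := by
        intro x hx
        rcases hball x (List.mem_toFinset.mp hx) with rfl | h
        · exact Finset.mem_insert_self _ _
        · exact Finset.mem_insert_of_mem (List.mem_toFinset.mpr (pv_mem_gridList x h))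
      have hcard : (C 25).toFinset.card = 26 := by
        rw [List.toFinset_card_of_nodup hCnd]; omega
      have hcard2 : (insert p0 pvGridList.toFinset).card ≤ 26 := by
        have h1 := Finset.card_insert_le p0 pvGridList.toFinset
        have h2 := pv_gridFinset_card
        omega
      have heq : (C 25).toFinset = insert p0 pvGridList.toFinset :=
        Finset.eq_of_subset_of_card_le hsubF (by omega)
      intro p hp q hq
      have hqg : pvInGrid q := hgridM q hq.1
      have hqF : q ∈ (C 25).toFinset := by
        rw [heq]
        exact Finset.mem_insert_of_mem (List.mem_toFinset.mpr (pv_mem_gridList q hqg))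
      exact List.mem_toFinset.mp hqF
  have hCmem : ∀ x, x ∈ C 25 ↔ pvReach mark p0 x :=
    pv_comp_char mark p0 (C 25) hCp0 hclosedC hCreach
  -- both result sets enumerate the same component, hence have the same size
  have hperm : W.Perm (C 25) := by
    rw [List.perm_ext_iff_of_nodup hWnd hCnd]
    intro x
    rw [hWmem x, hCmem x]
  have hlenWC : W.length = (C 25).length := hperm.length_eq
  -- put everything together
  show pieces (p0 :: tl) = pieces_alt (p0 :: tl)
  simp only [pieces, pieces_alt]
  rw [hV0, hW, ← hgdef, pv_foldl_range_const (pvGrow grid) 25 [p0], ← hn]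
  have hCn2 : (pvGrow grid)^[25] [p0] = C 25 := rfl
  rw [hCn2, hlenWC]
  by_cases he : (C 25).length = n
  · rw [he]; simp
  · have h1 : (((C 25).length : Int) == (n : Int)) = false := by
      rw [beq_eq_false_iff_ne]; exact_mod_cast he
    have h2 : (((C 25).length) == n) = false := by
      rw [beq_eq_false_iff_ne]; exact he
    rw [h1, h2]

-- ===== VERDICT (by name: the statement is the Claim_ definition above) =====
theorem pieces_spec : Claim_equal_pieces := by
  intro points _ hpre
  exact pv_pieces_eq points hpre
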